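-- pv_equiv track=rewrite | github.com/seven05/Jungle | jungle_week1/6day/2110.py | max_min_distance
-- ===== SOURCE A (Python) =====
-- def can_install_routers(houses, distance, routers):
--     count = 1
--     last_installed = houses[0]
--
--     for i in range(1, len(houses)):
--         if houses[i] - last_installed >= distance:
--             count += 1
--             last_installed = houses[i]
--             if count == routers:
--                 return True
--     return False
--
-- def max_min_distance(houses, routers):
--     houses.sort()
--     left = 1  # 최소 거리
--     right = houses[-1] - houses[0]  # 최대 거리
--     best_distance = 0
--
--     while left <= right:
--         mid = (left + right) // 2
--         if can_install_routers(houses, mid, routers):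
--             best_distance = mid  # 가능한 경우, 거리 기록
--             left = mid + 1  # 더 큰 거리 탐색
--         else:
--             right = mid - 1  # 더 작은 거리 탐색
--
--     return best_distance
-- ===== SOURCE B (Python) =====
-- def can_install_routers(houses, distance, routers):
--     count = 1
--     last_installed = houses[0]
--     for i in range(1, len(houses)):
--         if houses[i] - last_installed >= distance:
--             count += 1
--             last_installed = houses[i]
--             if count == routers:
--                 return True
--     return False
--
--
-- def max_min_distance(houses, routers):
--     # The optimum minimum distance, if any placement is feasible, is always a
--     # (positive) difference between two house positions: enumerate those
--     # candidate answers, and return the largest feasible one (feasibility is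
--     # monotone decreasing in the distance, so scan them from largest down).
--     houses.sort()
--     n = len(houses)
--     cands = {houses[j] - houses[i]
--              for i in range(n) for j in range(i + 1, n)
--              if houses[i] < houses[j]}
--     for d in sorted(cands, reverse=True):
--         if can_install_routers(houses, d, routers):
--             return d
--     return 0
-- ===== Notes on version B (the rewrite author's own statement) =====
-- stated objective: alternative
-- what changed: Replaces the left/right/mid binary search over the numeric range of distances with an enumeration of the actual candidate answers - the positive pairwise differences of house positions (the optimum is always one of them) - sorted descending and scanned for the first feasible one; the greedy feasibility check is kept identical. B trades the O(log D) search for an O(n^2) candidate enumeration.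
import Mathlib
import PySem

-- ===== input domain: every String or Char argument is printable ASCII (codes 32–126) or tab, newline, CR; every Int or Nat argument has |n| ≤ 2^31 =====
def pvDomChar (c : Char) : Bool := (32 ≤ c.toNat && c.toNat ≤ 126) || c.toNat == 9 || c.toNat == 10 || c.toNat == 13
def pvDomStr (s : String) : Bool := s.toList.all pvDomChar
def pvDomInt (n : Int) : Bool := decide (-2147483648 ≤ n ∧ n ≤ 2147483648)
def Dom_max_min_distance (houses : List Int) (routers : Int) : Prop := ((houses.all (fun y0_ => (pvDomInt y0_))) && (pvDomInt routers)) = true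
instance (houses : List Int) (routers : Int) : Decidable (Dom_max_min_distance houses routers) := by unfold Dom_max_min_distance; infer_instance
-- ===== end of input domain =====

-- B replaces A's binary search over the numeric distance range with an enumeration of the actual
-- candidate answers (positive pairwise differences of house positions), scanned largest-first for
-- the first feasible one. Both Pythons sort `houses` in place identically, so the claim is about
-- the (equal) return values.

-- ===== PORT A =====
-- the for-loop of can_install_routers with its early `return True`, as structural recursion
def canGo (distance routers : Int) : List Int → Int → Int → Bool
  | [], _, _ => false
  | x :: xs, count, last =>
    if distance ≤ x - last then
      if count + 1 == routers then true
      else canGo distance routers xs (count + 1) x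
    else canGo distance routers xs count last

def can_install_routers (houses : List Int) (distance routers : Int) : Bool :=
  match houses with
  | [] => false  -- unreachable under Pre_: Python raises IndexError on houses[0]
  | h :: t => canGo distance routers t 1 h

-- the while-loop of A's binary search
def binGo (hs : List Int) (routers left right best : Int) : Int :=
  if left ≤ right then
    let mid := PySem.Int.floordiv (left + right) 2
    if can_install_routers hs mid routers then
      binGo hs routers (mid + 1) right mid
    else
      binGo hs routers left (mid - 1) best
  else best
termination_by (right + 1 - left).toNat
decreasing_by
  · have := PySem.Int.floordiv_two_mid_bounds (by assumption : left ≤ right); omega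
  · have := PySem.Int.floordiv_two_mid_bounds (by assumption : left ≤ right); omega

def max_min_distance (houses : List Int) (routers : Int) : Int :=
  let hs := PySem.List.sorted houses (fun x => x) false
  let right := ((PySem.List.pyGet? hs (-1)).getD 0) - ((PySem.List.pyGet? hs 0).getD 0)
  binGo hs routers 1 right 0

-- ===== PORT B =====
-- B's set comprehension: {hs[j] - hs[i] for i, j with i < j and hs[i] < hs[j]}, in generation order
def pairDiffs : List Int → List Int
  | [] => []
  | x :: xs => ((xs.filter (fun y => decide (x < y))).map (fun y => y - x)) ++ pairDiffs xs

-- B's for-loop over the descending candidates, with its early `return d`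
def scanCands (hs : List Int) (routers : Int) : List Int → Int
  | [] => 0
  | c :: cs => if can_install_routers hs c routers then c else scanCands hs routers cs

def max_min_distance_alt (houses : List Int) (routers : Int) : Int :=
  let hs := PySem.List.sorted houses (fun x => x) false
  scanCands hs routers
    (PySem.List.sorted (PySem.Set.ofList (pairDiffs hs)) (fun x => x) true)

-- ===== PRECONDITION & SPEC =====
-- Pre_ excludes only the empty list, on which Python A raises IndexError at houses[-1].
def Pre_max_min_distance (houses : List Int) (routers : Int) : Prop := houses ≠ []
instance (houses : List Int) (routers : Int) : Decidable (Pre_max_min_distance houses routers) := by unfold Pre_max_min_distance; infer_instance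
def pvWitness_max_min_distance : List Int × Int := ([1, 2, 8, 4, 9], 3)

def Spec_max_min_distance (houses : List Int) (routers : Int) (out : Int) : Prop := out = max_min_distance_alt houses routers
instance (houses : List Int) (routers : Int) (out : Int) : Decidable (Spec_max_min_distance houses routers out) := by unfold Spec_max_min_distance; infer_instance

-- ===== CLAIM (what is proved, stated in full; the proofs are below) =====
def Claim_equal_max_min_distance : Prop := ∀ (houses : List Int) (routers : Int), Dom_max_min_distance houses routers → Pre_max_min_distance houses routers → Spec_max_min_distance houses routers (max_min_distance houses routers)

-- ===== LEMMAS AND PROOFS =====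

-- proof-side reference: the largest feasible distance in [1, d], else 0 (a naive countdown)
def downGo (hs : List Int) (routers d : Int) : Int :=
  if 1 ≤ d then
    if can_install_routers hs d routers then d
    else downGo hs routers (d - 1)
  else 0
termination_by d.toNat
decreasing_by omega

-- number of greedy picks at threshold d starting from `last`
def picks (d : Int) : List Int → Int → Nat
  | [], _ => 0
  | x :: xs, last => if d ≤ x - last then picks d xs x + 1 else picks d xs last

lemma canGo_eq (d r : Int) (xs : List Int) (c last : Int) :
    canGo d r xs c last = decide (c + 1 ≤ r ∧ r ≤ c + (picks d xs last : Int)) := by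
  induction xs generalizing c last with
  | nil => simp [canGo, picks]
  | cons x xs ih =>
    simp only [canGo, picks]
    by_cases hx : d ≤ x - last
    · by_cases hc : c + 1 = r
      · have hb : (c + 1 == r) = true := by simpa using hc
        simp only [if_pos hx, hb, if_true]
        have hp : (0 : Int) ≤ (picks d xs x : Int) := by positivity
        symm
        rw [decide_eq_true_iff]
        push_cast
        omega
      · have hb : (c + 1 == r) = false := by simpa using hc
        simp only [if_pos hx, hb, Bool.false_eq_true, if_false, ih]
        simp only [decide_eq_decide]
        push_cast
        omega
    · simp only [if_neg hx, ih]

-- greedy dominance: with a smaller starting point the greedy on a sorted tail picks at least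
-- as many routers, and at most one more
lemma picks_dom (d : Int) : ∀ (xs : List Int), xs.Pairwise (· ≤ ·) →
    ∀ a b : Int, a ≤ b → (∀ y ∈ xs, b ≤ y) →
    picks d xs b ≤ picks d xs a ∧ picks d xs a ≤ picks d xs b + 1 := by
  intro xs
  induction xs with
  | nil => simp [picks]
  | cons y t ih =>
    intro hp a b hab hby
    obtain ⟨hyt, hpt⟩ := List.pairwise_cons.mp hp
    have hby' : b ≤ y := hby y (List.mem_cons_self ..)
    simp only [picks]
    by_cases hb : d ≤ y - b
    · have ha : d ≤ y - a := by omega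
      simp only [if_pos ha, if_pos hb]
      omega
    · by_cases ha : d ≤ y - a
      · simp only [if_pos ha, if_neg hb]
        have h2 := ih hpt b y hby' hyt
        omega
      · simp only [if_neg ha, if_neg hb]
        exact ih hpt a b hab (fun z hz => le_trans hby' (hyt z hz))

-- monotonicity in the distance: raising d cannot increase the number of picks
lemma picks_anti (d d' : Int) (hd : d ≤ d') : ∀ (xs : List Int), xs.Pairwise (· ≤ ·) →
    ∀ last : Int, (∀ y ∈ xs, last ≤ y) → picks d' xs last ≤ picks d xs last := by
  intro xs
  induction xs with
  | nil => simp [picks]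
  | cons y t ih =>
    intro hp last hly
    obtain ⟨hyt, hpt⟩ := List.pairwise_cons.mp hp
    have hly' : last ≤ y := hly y (List.mem_cons_self ..)
    simp only [picks]
    by_cases h' : d' ≤ y - last
    · have h : d ≤ y - last := by omega
      simp only [if_pos h, if_pos h']
      have := ih hpt y hyt
      omega
    · by_cases h : d ≤ y - last
      · simp only [if_pos h, if_neg h']
        have h1 := ih hpt last (fun z hz => le_trans hly' (hyt z hz))
        have h2 := (picks_dom d t hpt last y hly' hyt).2
        omega
      · simp only [if_neg h, if_neg h']
        exact ih hpt last (fun z hz => le_trans hly' (hyt z hz))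

lemma can_mono (h : Int) (t : List Int) (r : Int) (hp : (h :: t).Pairwise (· ≤ ·))
    (d d' : Int) (hdd : d ≤ d') (hc : can_install_routers (h :: t) d' r = true) :
    can_install_routers (h :: t) d r = true := by
  obtain ⟨hht, hpt⟩ := List.pairwise_cons.mp hp
  simp only [can_install_routers, canGo_eq, decide_eq_true_iff] at hc ⊢
  have := picks_anti d d' hdd t hpt h hht
  omega

lemma le_getLast_of_pairwise (l : List Int) (hne : l ≠ []) (hp : l.Pairwise (· ≤ ·))
    (x : Int) (hx : x ∈ l) : x ≤ l.getLast hne := by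
  rw [List.getLast_eq_getElem]
  rw [List.pairwise_iff_getElem] at hp
  obtain ⟨i, hi, rfl⟩ := List.mem_iff_getElem.mp hx
  rcases Nat.lt_or_ge i (l.length - 1) with h | h
  · exact hp i (l.length - 1) hi (by omega) h
  · have : i = l.length - 1 := by omega
    subst this
    exact le_rfl

lemma head_le_of_pairwise (h : Int) (t : List Int) (hp : (h :: t).Pairwise (· ≤ ·))
    (x : Int) (hx : x ∈ h :: t) : h ≤ x := by
  rcases List.mem_cons.mp hx with rfl | hx'
  · exact le_rfl
  · exact (List.pairwise_cons.mp hp).1 x hx'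

lemma downGo_zero (hs : List Int) (r d : Int) (hd : d ≤ 0) : downGo hs r d = 0 := by
  rw [downGo]
  simp [show ¬(1 ≤ d) by omega]

lemma downGo_hit (hs : List Int) (r d : Int) (h1 : 1 ≤ d)
    (hc : can_install_routers hs d r = true) : downGo hs r d = d := by
  rw [downGo]
  simp [h1, hc]

-- the countdown skips over a band of infeasible distances
lemma downGo_skip (hs : List Int) (r : Int) : ∀ (n : Nat) (R rr : Int), (R - rr).toNat = n →
    rr ≤ R → (∀ d, rr < d → d ≤ R → can_install_routers hs d r = false) →
    downGo hs r R = downGo hs r rr := by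
  intro n
  induction n with
  | zero =>
    intro R rr hn hle _
    have : R = rr := by omega
    rw [this]
  | succ n ih =>
    intro R rr hn hle hinf
    have hlt : rr < R := by omega
    by_cases hR : 1 ≤ R
    · have hcf : can_install_routers hs R r = false := hinf R hlt le_rfl
      rw [downGo]
      simp only [if_pos hR, hcf, Bool.false_eq_true]
      exact ih (R - 1) rr (by omega) (by omega)
        (fun d h1 h2 => hinf d h1 (by omega))
    · rw [downGo_zero hs r R (by omega), downGo_zero hs r rr (by omega)]

-- downGo returns 0 or a feasible value in [1, X]
lemma downGo_cases (hs : List Int) (r : Int) : ∀ (n : Nat) (X : Int), X.toNat = n →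
    downGo hs r X = 0 ∨ (1 ≤ downGo hs r X ∧ downGo hs r X ≤ X ∧
      can_install_routers hs (downGo hs r X) r = true) := by
  intro n
  induction n with
  | zero =>
    intro X hn
    left
    exact downGo_zero hs r X (by omega)
  | succ n ih =>
    intro X hn
    have h1 : (1 : Int) ≤ X := by omega
    by_cases hc : can_install_routers hs X r = true
    · right
      rw [downGo_hit hs r X h1 hc]
      exact ⟨h1, le_rfl, hc⟩
    · rw [downGo]
      simp only [if_pos h1, eq_false_of_ne_true hc, Bool.false_eq_true, if_false]
      rcases ih (X - 1) (by omega) with h0 | ⟨ha, hb, hcc⟩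
      · exact Or.inl h0
      · exact Or.inr ⟨ha, by omega, hcc⟩

-- everything strictly above downGo's result (within [1, X]) is infeasible
lemma downGo_gt (hs : List Int) (r : Int) : ∀ (n : Nat) (X : Int), X.toNat = n →
    ∀ d, downGo hs r X < d → d ≤ X → can_install_routers hs d r = false := by
  intro n
  induction n with
  | zero =>
    intro X hn d hgt hle
    rw [downGo_zero hs r X (by omega)] at hgt
    omega
  | succ n ih =>
    intro X hn d hgt hle
    have h1 : (1 : Int) ≤ X := by omega
    by_cases hc : can_install_routers hs X r = true
    · rw [downGo_hit hs r X h1 hc] at hgt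
      omega
    · have hfx : can_install_routers hs X r = false := eq_false_of_ne_true hc
      rw [downGo] at hgt
      simp only [if_pos h1, hfx, Bool.false_eq_true, if_false] at hgt
      rcases lt_or_eq_of_le hle with hlt | rfl
      · exact ih (X - 1) (by omega) d hgt (by omega)
      · exact hfx

-- invariant proof: A's binary search equals the reference countdown from R
lemma binGo_eq (hs : List Int) (r R : Int)
    (mono : ∀ d d', d ≤ d' → can_install_routers hs d' r = true →
      can_install_routers hs d r = true) :
    ∀ (n : Nat) (l rt best : Int), (rt + 1 - l).toNat = n →
    1 ≤ l → l ≤ rt + 1 → best = l - 1 → rt ≤ R →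
    (best = 0 ∨ (1 ≤ best ∧ can_install_routers hs best r = true)) →
    (∀ d, rt < d → d ≤ R → can_install_routers hs d r = false) →
    binGo hs r l rt best = downGo hs r R := by
  intro n
  induction n using Nat.strong_induction_on with
  | _ n ih =>
    intro l rt best hn h1l hlr1 hbest hrR hor hinf
    by_cases hlr : l ≤ rt
    · have hmid := PySem.Int.floordiv_two_mid_bounds hlr
      set mid := PySem.Int.floordiv (l + rt) 2 with hmiddef
      rw [binGo]
      simp only [if_pos hlr, ← hmiddef]
      by_cases hc : can_install_routers hs mid r = true
      · simp only [hc, if_pos]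
        exact ih (rt + 1 - (mid + 1)).toNat (by omega) (mid + 1) rt mid (by omega)
          (by omega) (by omega) (by omega) hrR (Or.inr ⟨by omega, hc⟩) hinf
      · simp only [hc]
        refine ih (mid - 1 + 1 - l).toNat (by omega) l (mid - 1) best (by omega)
          h1l (by omega) hbest (by omega) hor ?_
        intro d hd1 hd2
        by_cases hdr : rt < d
        · exact hinf d hdr hd2
        · cases hcd : can_install_routers hs d r with
          | false => rfl
          | true => exact absurd (mono mid d (by omega) hcd) hc
    · rw [binGo]
      simp only [if_neg hlr]
      have hbr : best = rt := by omega
      rw [downGo_skip hs r (R - rt).toNat R rt rfl (by omega) hinf]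
      rcases hor with h0 | ⟨hb1, hbc⟩
      · rw [downGo_zero hs r rt (by omega), h0]
      · rw [hbr] at hb1 hbc ⊢
        exact (downGo_hit hs r rt hb1 hbc).symm

-- membership in the candidate set = a positive difference of an ordered pair of houses
lemma mem_pairDiffs (l : List Int) (c : Int) :
    c ∈ pairDiffs l ↔ ∃ a b, [a, b].Sublist l ∧ a < b ∧ c = b - a := by
  induction l with
  | nil =>
    simp only [pairDiffs, List.not_mem_nil, false_iff]
    rintro ⟨a, b, hsub, -, -⟩
    exact absurd (List.Sublist.length_le hsub) (by simp)
  | cons x xs ih =>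
    simp only [pairDiffs, List.mem_append, List.mem_map, List.mem_filter, ih]
    constructor
    · rintro (⟨y, ⟨hy, hxy⟩, rfl⟩ | ⟨a, b, hsub, hab, rfl⟩)
      · exact ⟨x, y, (List.cons_sublist_cons).mpr (List.singleton_sublist.mpr hy),
          by simpa using hxy, rfl⟩
      · exact ⟨a, b, hsub.cons x, hab, rfl⟩
    · rintro ⟨a, b, hsub, hab, rfl⟩
      cases hsub with
      | cons _ h => exact Or.inr ⟨a, b, h, hab, rfl⟩
      | cons₂ _ h =>
        exact Or.inl ⟨b, ⟨List.singleton_sublist.mp h, by simpa using hab⟩, rfl⟩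

-- gaps ≥ d along a chain of houses
def chainGaps (d : Int) : Int → List Int → Prop
  | _, [] => True
  | last, y :: ys => d ≤ y - last ∧ chainGaps d y ys

lemma chainGaps_mono (d d' : Int) (hdd : d' ≤ d) :
    ∀ (ys : List Int) (last : Int), chainGaps d last ys → chainGaps d' last ys := by
  intro ys
  induction ys with
  | nil => intro last _; trivial
  | cons y t ih =>
    intro last hcg
    exact ⟨by have := hcg.1; omega, ih y hcg.2⟩

-- the greedy's own chain of picked houses
def gchain (d : Int) : List Int → Int → List Int
  | [], _ => []
  | x :: xs, last => if d ≤ x - last then x :: gchain d xs x else gchain d xs last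

lemma gchain_length (d : Int) : ∀ (xs : List Int) (last : Int),
    (gchain d xs last).length = picks d xs last := by
  intro xs
  induction xs with
  | nil => intro last; rfl
  | cons x t ih =>
    intro last
    simp only [gchain, picks]
    split_ifs <;> simp [ih]

lemma gchain_sublist (d : Int) : ∀ (xs : List Int) (last : Int),
    (gchain d xs last).Sublist xs := by
  intro xs
  induction xs with
  | nil => intro last; exact List.Sublist.refl []
  | cons x t ih =>
    intro last
    simp only [gchain]
    split_ifs
    · exact (ih x).cons₂ x
    · exact (ih last).cons x

lemma gchain_chain (d : Int) : ∀ (xs : List Int) (last : Int),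
    chainGaps d last (gchain d xs last) := by
  intro xs
  induction xs with
  | nil => intro last; trivial
  | cons x t ih =>
    intro last
    simp only [gchain]
    split_ifs with h
    · exact ⟨h, ih x⟩
    · exact ih last

-- greedy optimality: no chain inside a sorted list beats the greedy pick count
lemma chain_le_picks (g : Int) (hg : 1 ≤ g) : ∀ (xs : List Int), xs.Pairwise (· ≤ ·) →
    ∀ (last : Int) (sub : List Int), sub.Sublist xs → chainGaps g last sub →
    sub.length ≤ picks g xs last := by
  intro xs
  induction xs with
  | nil =>
    intro hp last sub hsub _
    simp [List.sublist_nil.mp hsub, picks]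
  | cons x t ih =>
    intro hp last sub hsub hcg
    obtain ⟨hxt, hpt⟩ := List.pairwise_cons.mp hp
    simp only [picks]
    by_cases hx : g ≤ x - last
    · simp only [if_pos hx]
      cases hsub with
      | cons _ h =>
        calc sub.length ≤ picks g t last := ih hpt last sub h hcg
          _ ≤ picks g t x + 1 := (picks_dom g t hpt last x (by omega) hxt).2
      | cons₂ _ h =>
        have := ih hpt x _ h hcg.2
        simpa using this
    · simp only [if_neg hx]
      cases hsub with
      | cons _ h => exact ih hpt last sub h hcg
      | cons₂ _ h => exact absurd hcg.1 hx

-- the minimum adjacent gap along a chain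
def minGapF (last : Int) : List Int → Int
  | [] => 0
  | [y] => y - last
  | y :: z :: ys => min (y - last) (minGapF y (z :: ys))

lemma minGapF_ge (d : Int) : ∀ (ys : List Int) (last : Int), ys ≠ [] →
    chainGaps d last ys → d ≤ minGapF last ys := by
  intro ys
  induction ys with
  | nil => intro last h _; exact absurd rfl h
  | cons y t ih =>
    intro last _ hcg
    cases t with
    | nil => simpa [minGapF] using hcg.1
    | cons z zs =>
      have h1 := hcg.1
      have h2 := ih y (by simp) hcg.2
      simp only [minGapF]
      omega

lemma minGapF_chain : ∀ (ys : List Int) (last : Int),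
    chainGaps (minGapF last ys) last ys := by
  intro ys
  induction ys with
  | nil => intro last; trivial
  | cons y t ih =>
    intro last
    cases t with
    | nil => exact ⟨by simp [minGapF], trivial⟩
    | cons z zs =>
      refine ⟨by simp only [minGapF]; omega, ?_⟩
      exact chainGaps_mono (minGapF y (z :: zs)) (minGapF last (y :: z :: zs))
        (by simp only [minGapF]; omega) (z :: zs) y (ih y)

lemma minGapF_mem_pairDiffs (l : List Int) : ∀ (ys : List Int) (last : Int), ys ≠ [] →
    (last :: ys).Sublist l → 1 ≤ minGapF last ys → minGapF last ys ∈ pairDiffs l := by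
  intro ys
  induction ys with
  | nil => intro last h _ _; exact absurd rfl h
  | cons y t ih =>
    intro last _ hsub h1
    cases t with
    | nil =>
      rw [mem_pairDiffs]
      refine ⟨last, y, hsub, ?_, rfl⟩
      simp only [minGapF] at h1
      omega
    | cons z zs =>
      simp only [minGapF] at h1 ⊢
      rcases le_total (y - last) (minGapF y (z :: zs)) with hle | hle
      · rw [min_eq_left hle]
        rw [mem_pairDiffs]
        have hsub2 : [last, y].Sublist l := by
          refine List.Sublist.trans ?_ hsub
          exact (List.cons_sublist_cons).mpr
            ((List.cons_sublist_cons).mpr (List.nil_sublist _))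
        exact ⟨last, y, hsub2, by omega, rfl⟩
      · rw [min_eq_right hle]
        refine ih y (by simp) ?_ (by omega)
        exact List.Sublist.trans (List.Sublist.cons last (List.Sublist.refl _)) hsub

-- every candidate is positive and bounded by the total span
lemma pairDiffs_bounds (h : Int) (t : List Int) (hp : (h :: t).Pairwise (· ≤ ·))
    (c : Int) (hc : c ∈ pairDiffs (h :: t)) :
    1 ≤ c ∧ c ≤ (h :: t).getLast (by simp) - h := by
  rw [mem_pairDiffs] at hc
  obtain ⟨a, b, hsub, hab, rfl⟩ := hc
  have ha : a ∈ h :: t := hsub.subset (by simp)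
  have hb : b ∈ h :: t := hsub.subset (by simp)
  have h1 := head_le_of_pairwise h t hp a ha
  have h2 := le_getLast_of_pairwise (h :: t) (by simp) hp b hb
  omega

-- the maximum feasible distance is itself a pairwise difference of houses
lemma max_feasible_mem (h : Int) (t : List Int) (r m : Int)
    (hp : (h :: t).Pairwise (· ≤ ·)) (hm1 : 1 ≤ m)
    (hmR : m ≤ (h :: t).getLast (by simp) - h)
    (hfeas : can_install_routers (h :: t) m r = true)
    (hmax : ∀ d, 1 ≤ d → d ≤ (h :: t).getLast (by simp) - h →
      can_install_routers (h :: t) d r = true → d ≤ m) :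
    m ∈ pairDiffs (h :: t) := by
  obtain ⟨hht, hpt⟩ := List.pairwise_cons.mp hp
  have hfe : 2 ≤ r ∧ r ≤ 1 + (picks m t h : Int) := by
    have := hfeas
    simp only [can_install_routers, canGo_eq, decide_eq_true_iff] at this
    omega
  set K := gchain m t h with hK
  have hKlen : K.length = picks m t h := gchain_length m t h
  have hKne : K ≠ [] := by
    intro hnil
    rw [hnil] at hKlen
    simp only [List.length_nil] at hKlen
    omega
  have hKsub : (h :: K).Sublist (h :: t) :=
    (List.cons_sublist_cons).mpr (gchain_sublist m t h)
  have hKcg : chainGaps m h K := gchain_chain m t h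
  set g := minGapF h K with hg
  have hgm : m ≤ g := minGapF_ge m K h hKne hKcg
  have hgmem : g ∈ pairDiffs (h :: t) :=
    minGapF_mem_pairDiffs (h :: t) K h hKne hKsub (by omega)
  have hgb := pairDiffs_bounds h t hp g hgmem
  -- the greedy chain shows g is feasible too, so by maximality g = m
  have hgcg : chainGaps g h K := minGapF_chain K h
  have hgpicks : K.length ≤ picks g t h :=
    chain_le_picks g (by omega) t hpt h K (gchain_sublist m t h) hgcg
  have hgfeas : can_install_routers (h :: t) g r = true := by
    simp only [can_install_routers, canGo_eq, decide_eq_true_iff]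
    omega
  have : g ≤ m := hmax g hgb.1 hgb.2 hgfeas
  have : g = m := by omega
  rwa [← this]

-- B's descending scan over the candidates returns the maximum feasible distance
lemma scanCands_eq (hs : List Int) (r R m : Int) (hm0 : 0 ≤ m)
    (hfeas : 1 ≤ m → can_install_routers hs m r = true)
    (hmax : ∀ d, 1 ≤ d → d ≤ R → can_install_routers hs d r = true → d ≤ m) :
    ∀ (C : List Int), C.Pairwise (fun a b => b ≤ a) →
    (∀ c ∈ C, 1 ≤ c ∧ c ≤ R) → (1 ≤ m → m ∈ C) →
    scanCands hs r C = m := by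
  intro C
  induction C with
  | nil =>
    intro _ _ hmem
    simp only [scanCands]
    by_cases h1 : 1 ≤ m
    · exact absurd (hmem h1) (List.not_mem_nil)
    · omega
  | cons c cs ih =>
    intro hpw hbnd hmem
    obtain ⟨hcge, hpw'⟩ := List.pairwise_cons.mp hpw
    obtain ⟨hc1, hcR⟩ := hbnd c (List.mem_cons_self ..)
    simp only [scanCands]
    by_cases hc : can_install_routers hs c r = true
    · simp only [hc, if_pos]
      have hcm : c ≤ m := hmax c hc1 hcR hc
      have hm1 : 1 ≤ m := by omega
      rcases List.mem_cons.mp (hmem hm1) with rfl | hmcs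
      · rfl
      · have := hcge m hmcs
        omega
    · simp only [hc, Bool.false_eq_true, if_false]
      refine ih hpw' (fun x hx => hbnd x (List.mem_cons_of_mem _ hx)) ?_
      intro hm1
      rcases List.mem_cons.mp (hmem hm1) with rfl | hmcs
      · exact absurd (hfeas hm1) hc
      · exact hmcs

-- ===== VERDICT (by name: the statement is the Claim_ definition above) =====
theorem max_min_distance_spec : Claim_equal_max_min_distance := by
  intro houses routers _hdom hpre
  unfold Spec_max_min_distance max_min_distance max_min_distance_alt
  have hne : PySem.List.sorted houses (fun x => x) false ≠ [] := by
    rw [Ne, PySem.List.sorted_eq_nil_iff]; exact hpre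
  obtain ⟨h, t, hht⟩ : ∃ h t, PySem.List.sorted houses (fun x => x) false = h :: t := by
    cases hs : PySem.List.sorted houses (fun x => x) false with
    | nil => exact absurd hs hne
    | cons a b => exact ⟨a, b, rfl⟩
  have hp : (h :: t).Pairwise (· ≤ ·) := by
    have := PySem.List.sorted_pairwise houses (fun x => x)
    rwa [hht] at this
  rw [hht]
  set R := ((PySem.List.pyGet? (h :: t) (-1)).getD 0) - ((PySem.List.pyGet? (h :: t) 0).getD 0) with hRdef
  have hRlast : R = (h :: t).getLast (by simp) - h := by
    rw [hRdef, PySem.List.pyGet?_neg_one, PySem.List.pyGet?_zero,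
      List.getLast?_eq_some_getLast (by simp)]
    simp
  have hR0 : 0 ≤ R := by
    rw [hRlast]
    have := le_getLast_of_pairwise (h :: t) (by simp) hp h (List.mem_cons_self ..)
    omega
  have mono : ∀ d d', d ≤ d' → can_install_routers (h :: t) d' routers = true →
      can_install_routers (h :: t) d routers = true :=
    fun d d' hdd hc => can_mono h t routers hp d d' hdd hc
  -- A's binary search equals the reference maximum m := downGo … R
  rw [binGo_eq (h :: t) routers R mono (R + 1 - 1).toNat 1 R 0 rfl le_rfl (by omega) rfl
    le_rfl (Or.inl rfl) (fun d hd1 hd2 => by omega)]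
  set m := downGo (h :: t) routers R with hm
  have hcases := downGo_cases (h :: t) routers R.toNat R rfl
  rw [← hm] at hcases
  have hm0 : 0 ≤ m := by rcases hcases with h0 | ⟨h1, _, _⟩ <;> omega
  have hfeas : 1 ≤ m → can_install_routers (h :: t) m routers = true := by
    intro h1
    rcases hcases with h0 | ⟨_, _, h3⟩
    · omega
    · exact h3
  have hmax : ∀ d, 1 ≤ d → d ≤ R → can_install_routers (h :: t) d routers = true → d ≤ m := by
    intro d hd1 hdR hcan
    by_contra hgt
    have := downGo_gt (h :: t) routers R.toNat R rfl d (by omega) hdR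
    rw [this] at hcan
    exact absurd hcan (by simp)
  -- B's descending candidate scan equals the same reference maximum
  refine (scanCands_eq (h :: t) routers R m hm0 hfeas hmax _ ?_ ?_ ?_).symm
  · exact PySem.List.sorted_pairwise_rev _ (fun x => x)
  · intro c hc
    rw [PySem.List.mem_sorted] at hc
    rw [PySem.Set.mem_ofList] at hc
    have := pairDiffs_bounds h t hp c hc
    omega
  · intro hm1
    rw [PySem.List.mem_sorted, PySem.Set.mem_ofList]
    have hmR : m ≤ (h :: t).getLast (by simp) - h := by
      rcases hcases with h0 | ⟨_, h2, _⟩ <;> omega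
    exact max_feasible_mem h t routers m hp hm1 hmR (hfeas hm1)
      (fun d hd1 hd2 hdc => hmax d hd1 (by omega) hdc)
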